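-- pv_equiv track=rewrite | github.com/calisweetleaf/recursive-categorical-framework | rcf_integration/rsgt/motivation_system.py | _calculate_goal_hierarchy_depths
-- ===== SOURCE A (Python) =====
-- from typing import Dict, List, Set, Tuple, Optional, Any, Union
--
-- def _calculate_goal_hierarchy_depths(goals: Dict[str, Dict]) -> Dict[str, int]:
--     """Calculate the depth of each goal in the hierarchy."""
--     depths = {}
--
--     def calculate_depth(goal_id):
--         if goal_id in depths:
--             return depths[goal_id]
--
--         goal = goals.get(goal_id, {})
--         parent_id = goal.get('parent_goal')
--
--         if not parent_id:
--             depths[goal_id] = 0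
--             return 0
--
--         parent_depth = calculate_depth(parent_id)
--         depths[goal_id] = parent_depth + 1
--         return depths[goal_id]
--
--     for goal_id in goals:
--         calculate_depth(goal_id)
--
--     return depths
-- ===== SOURCE B (Python) =====
-- def _calculate_goal_hierarchy_depths(goals):
--     """Calculate the depth of each goal in the hierarchy (iterative, explicit stack)."""
--     depths = {}
--     for gid in goals:
--         if gid in depths:
--             continue
--         stack = []
--         cur = gid
--         depth = -1
--         while True:
--             if cur in depths:
--                 depth = depths[cur]
--                 break
--             stack.append(cur)
--             parent = goals.get(cur, {}).get('parent_goal')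
--             if not parent:
--                 depth = -1
--                 break
--             cur = parent
--         while stack:
--             nid = stack.pop()
--             depth += 1
--             depths[nid] = depth
--     return depths
-- ===== Notes on version B (the rewrite author's own statement) =====
-- stated objective: alternative
-- what changed: Replaces A's memoised recursion (nested calculate_depth with RecursionError risk) by an iterative upward walk with an explicit stack: push ids until a root or an already-computed id, then pop the stack assigning consecutive depths.
import Mathlib
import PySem

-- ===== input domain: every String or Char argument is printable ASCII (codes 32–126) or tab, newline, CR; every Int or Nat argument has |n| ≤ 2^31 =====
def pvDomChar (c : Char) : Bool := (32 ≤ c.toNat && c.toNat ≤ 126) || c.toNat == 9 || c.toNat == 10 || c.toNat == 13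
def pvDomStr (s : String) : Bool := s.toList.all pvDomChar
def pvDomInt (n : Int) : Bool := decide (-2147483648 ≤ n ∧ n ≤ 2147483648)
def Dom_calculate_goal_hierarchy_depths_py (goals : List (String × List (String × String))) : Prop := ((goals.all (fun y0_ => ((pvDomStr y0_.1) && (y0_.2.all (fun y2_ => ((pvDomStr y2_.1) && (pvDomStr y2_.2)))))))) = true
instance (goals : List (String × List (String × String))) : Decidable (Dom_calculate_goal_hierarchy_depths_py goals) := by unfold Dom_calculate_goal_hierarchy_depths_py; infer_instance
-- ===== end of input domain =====

-- B replaces A's memoised recursion by an explicit-stack iterative walk (alternative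
-- decomposition, same cost); equivalence is proved on acyclic parent chains (Pre_),
-- since A raises RecursionError on cyclic ones.

-- ===== PORT A =====
-- shared input view: the Python argument is a dict of dicts; the assoc-list input is
-- read exactly as Python's dict(...) would (later duplicate keys overwrite in place)
def pvBuildG (goals : List (String × List (String × String))) :
    PySem.Dict String (PySem.Dict String String) :=
  PySem.Dict.ofList (goals.map (fun p => (p.1, PySem.Dict.ofList p.2)))

-- goal.get('parent_goal') followed by Python truthiness ('' and missing are falsy)
def pvParent (g : PySem.Dict String (PySem.Dict String String)) (id : String) : Option String :=
  match (g.getD id PySem.Dict.empty).get? "parent_goal" with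
  | none => none
  | some p => if p = "" then none else some p

-- the inner recursive calculate_depth; fuel bounds the recursion depth (under
-- Pre_ the chain length is ≤ goals.length + 1, so fuel never runs out there)
def pvCalcDepthA (g : PySem.Dict String (PySem.Dict String String)) :
    Nat → PySem.Dict String Int → String → PySem.Dict String Int × Int
  | 0, d, _ => (d, 0)
  | fuel + 1, d, id =>
    match d.get? id with
    | some v => (d, v)
    | none =>
      match pvParent g id with
      | none => (d.insert id 0, 0)
      | some p =>
        let r := pvCalcDepthA g fuel d p
        (r.1.insert id (r.2 + 1), r.2 + 1)

def calculate_goal_hierarchy_depths_py (goals : List (String × List (String × String))) : List (String × Int) :=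
  let g := pvBuildG goals
  (g.keys.foldl (fun d id => (pvCalcDepthA g (goals.length + 1) d id).1) PySem.Dict.empty).items

-- ===== PORT B =====
-- the upward walk: push ids until a root or a memoised id; returns the stack and the
-- seed value of the `depth` variable (-1 for a root, depths[cur] on a memo hit)
def pvWalkB (g : PySem.Dict String (PySem.Dict String String)) :
    Nat → PySem.Dict String Int → String → List String → List String × Int
  | 0, _, _, stack => (stack, -1)
  | fuel + 1, d, cur, stack =>
    match d.get? cur with
    | some v => (stack, v)
    | none =>
      match pvParent g cur with
      | none => (stack ++ [cur], -1)
      | some p => pvWalkB g fuel d p (stack ++ [cur])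

-- the draining `while stack` loop: pop from the end, depth += 1, assign
def pvDrainB (d : PySem.Dict String Int) (depth : Int) (stack : List String) :
    PySem.Dict String Int × Int :=
  stack.reverse.foldl (fun p nid => (p.1.insert nid (p.2 + 1), p.2 + 1)) (d, depth)

def pvProcessB (g : PySem.Dict String (PySem.Dict String String)) (fuel : Nat)
    (d : PySem.Dict String Int) (id : String) : PySem.Dict String Int × Int :=
  let w := pvWalkB g fuel d id []
  pvDrainB d w.2 w.1

def calculate_goal_hierarchy_depths_py_alt (goals : List (String × List (String × String))) : List (String × Int) :=
  let g := pvBuildG goals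
  (g.keys.foldl
    (fun d id => if d.contains id then d else (pvProcessB g (goals.length + 1) d id).1)
    PySem.Dict.empty).items

-- ===== PRECONDITION & SPEC =====
-- A property of the INPUT's parent-pointer graph only (it never computes any depth):
-- the parent chain from id reaches a root (falsy or missing parent) within k steps.
def pvTerm (g : PySem.Dict String (PySem.Dict String String)) : Nat → String → Bool
  | 0, _ => false
  | k + 1, id =>
    match pvParent g id with
    | none => true
    | some p => pvTerm g k p

-- Pre_ = the parent links are acyclic: every key's parent chain reaches a root.  The
-- bound goals.length + 1 is not a size cap — an acyclic chain visits distinct keys, so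
-- it always terminates within that many steps; the condition excludes exactly the
-- cyclic inputs, on which the Python recursion raises RecursionError.
def Pre_calculate_goal_hierarchy_depths_py (goals : List (String × List (String × String))) : Prop :=
  ((pvBuildG goals).keys.all (fun id => pvTerm (pvBuildG goals) (goals.length + 1) id)) = true
instance (goals : List (String × List (String × String))) : Decidable (Pre_calculate_goal_hierarchy_depths_py goals) := by unfold Pre_calculate_goal_hierarchy_depths_py; infer_instance

def pvWitness_calculate_goal_hierarchy_depths_py : (List (String × List (String × String))) :=
  [("a", []), ("b", [("parent_goal", "a")]), ("c", [("parent_goal", "b"), ("x", "y")])]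

def Spec_calculate_goal_hierarchy_depths_py (goals : List (String × List (String × String))) (out : List (String × Int)) : Prop := out = calculate_goal_hierarchy_depths_py_alt goals
instance (goals : List (String × List (String × String))) (out : List (String × Int)) : Decidable (Spec_calculate_goal_hierarchy_depths_py goals out) := by unfold Spec_calculate_goal_hierarchy_depths_py; infer_instance

-- ===== CLAIM (what is proved, stated in full; the proofs are below) =====
def Claim_equal_calculate_goal_hierarchy_depths_py : Prop := ∀ (goals : List (String × List (String × String))), Dom_calculate_goal_hierarchy_depths_py goals → Pre_calculate_goal_hierarchy_depths_py goals → Spec_calculate_goal_hierarchy_depths_py goals (calculate_goal_hierarchy_depths_py goals)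

-- ===== LEMMAS AND PROOFS =====

-- the walk only ever appends to its stack accumulator
theorem pvWalkB_append (g : PySem.Dict String (PySem.Dict String String))
    (fuel : Nat) :
    ∀ (d : PySem.Dict String Int) (cur : String) (stack : List String),
    pvWalkB g fuel d cur stack =
      (stack ++ (pvWalkB g fuel d cur []).1, (pvWalkB g fuel d cur []).2) := by
  induction fuel with
  | zero => intro d cur stack; simp [pvWalkB]
  | succ f ih =>
    intro d cur stack
    cases h : d.get? cur with
    | some v => simp [pvWalkB, h]
    | none =>
      cases hp : pvParent g cur with
      | none => simp [pvWalkB, h, hp]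
      | some p =>
        have e1 := ih d p (stack ++ [cur])
        have e2 := ih d p [cur]
        simp [pvWalkB, h, hp, e1, e2]

-- draining a stack with one more element at the bottom assigns that element last
theorem pvDrainB_cons (d : PySem.Dict String Int) (seed : Int) (x : String)
    (s : List String) :
    pvDrainB d seed (x :: s) =
      ((pvDrainB d seed s).1.insert x ((pvDrainB d seed s).2 + 1),
        (pvDrainB d seed s).2 + 1) := by
  simp [pvDrainB, List.foldl_append]

-- per-call equivalence: on a terminating chain, the memoised recursion and the
-- stack walk + drain produce the same (dict, depth) pair
theorem pvCalc_eq_process (g : PySem.Dict String (PySem.Dict String String)) :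
    ∀ (k fuel : Nat) (d : PySem.Dict String Int) (id : String),
    pvTerm g k id = true → k ≤ fuel →
    pvCalcDepthA g fuel d id = pvProcessB g fuel d id := by
  intro k
  induction k with
  | zero => intro fuel d id ht; simp [pvTerm] at ht
  | succ k ih =>
    intro fuel d id ht hle
    cases fuel with
    | zero => omega
    | succ f =>
      cases h : d.get? id with
      | some v => simp [pvCalcDepthA, pvProcessB, pvWalkB, pvDrainB, h]
      | none =>
        cases hp : pvParent g id with
        | none =>
          simp [pvCalcDepthA, pvProcessB, pvWalkB, pvDrainB, h, hp]
        | some p =>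
          have htp : pvTerm g k p = true := by
            simpa [pvTerm, hp] using ht
          have hrec := ih f d p htp (by omega)
          have e1 := pvWalkB_append g f d p [id]
          simp only [pvCalcDepthA, pvProcessB, pvWalkB, h, hp, List.nil_append, e1,
            List.singleton_append]
          rw [pvDrainB_cons]
          have : pvDrainB d (pvWalkB g f d p []).2 (pvWalkB g f d p []).1
              = pvCalcDepthA g f d p := by
            rw [hrec]; rfl
          rw [this]

-- ===== VERDICT (by name: the statement is the Claim_ definition above) =====
theorem calculate_goal_hierarchy_depths_py_spec : Claim_equal_calculate_goal_hierarchy_depths_py := by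
  intro goals _hdom hpre
  unfold Spec_calculate_goal_hierarchy_depths_py
  unfold calculate_goal_hierarchy_depths_py calculate_goal_hierarchy_depths_py_alt
  show (List.foldl (fun d id => (pvCalcDepthA (pvBuildG goals) (goals.length + 1) d id).1)
      PySem.Dict.empty (pvBuildG goals).keys).items
    = (List.foldl (fun d id => if d.contains id = true then d
          else (pvProcessB (pvBuildG goals) (goals.length + 1) d id).1)
        PySem.Dict.empty (pvBuildG goals).keys).items
  refine congrArg PySem.Dict.items ?_
  apply PySem.List.foldl_congr_mem
  intro d id hmem
  unfold Pre_calculate_goal_hierarchy_depths_py at hpre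
  rw [List.all_eq_true] at hpre
  have ht : pvTerm (pvBuildG goals) (goals.length + 1) id = true := by
    simpa using hpre id hmem
  have hmain := pvCalc_eq_process (pvBuildG goals) (goals.length + 1) (goals.length + 1)
      d id ht (le_refl _)
  by_cases hc : d.contains id = true
  · obtain ⟨v, hv⟩ : ∃ v, d.get? id = some v := by
      rw [PySem.Dict.contains_eq_isSome_get?] at hc
      exact Option.isSome_iff_exists.mp hc
    have h1 : (pvCalcDepthA (pvBuildG goals) (goals.length + 1) d id).1 = d := by
      simp [pvCalcDepthA, hv]
    rw [h1, if_pos hc]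
  · rw [if_neg hc, hmain]
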